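-- pv_equiv track=rewrite | github.com/rainzrz/estudos | Algoritmo/alg_hospitalGrafo.py | solution
-- ===== SOURCE A (Python) =====
-- def solution(N, A, B, H):
--     city_map = [[] for _ in range(N)]
--     for i in range(len(A)):
--         city_map[A[i]].append(B[i])
--         city_map[B[i]].append(A[i])
--     time_to_hospital = [-1] * N
--
--     districts_to_visit = []
--     index = 0
--
--     for hospital in H:
--         time_to_hospital[hospital] = 0
--         districts_to_visit.append(hospital)
--
--     while index < len(districts_to_visit):
--         current_district = districts_to_visit[index]
--         index += 1
--
--         for connected_district in city_map[current_district]: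
--             if time_to_hospital[connected_district] == -1:
--                 time_to_hospital[connected_district] = (
--                     time_to_hospital[current_district] + 1
--                 )
--                 districts_to_visit.append(connected_district)
--
--     longest_time = 0
--     for time in time_to_hospital:
--         if time == -1:
--             return -1
--         if time > longest_time:
--             longest_time = time
--
--     return longest_time
-- ===== SOURCE B (Python) =====
-- def solution(N, A, B, H):
--     # Bellman-Ford style edge relaxation: no adjacency list, no queue.
--     INF = N
--     dist = [INF] * N
--     for h in H:
--         dist[h] = 0
--     changed = True
--     while changed:
--         changed = False
--         for a, b in zip(A, B):
--             if dist[a] + 1 < dist[b]: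
--                 dist[b] = dist[a] + 1
--                 changed = True
--             if dist[b] + 1 < dist[a]:
--                 dist[a] = dist[b] + 1
--                 changed = True
--     if INF in dist:
--         return -1
--     return max(dist, default=0)
-- ===== Notes on version B (the rewrite author's own statement) =====
-- stated objective: alternative
-- what changed: Replaced the multi-source BFS (adjacency list + FIFO queue + per-node distance array scanned at the end) by Bellman-Ford style dynamic programming: no adjacency list and no queue at all, just repeated in-place relaxation passes over the raw edge list (dist[b]=min(dist[b],dist[a]+1) and symmetrically) until a pass changes nothing, with N as infinity.
import Mathlib
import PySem

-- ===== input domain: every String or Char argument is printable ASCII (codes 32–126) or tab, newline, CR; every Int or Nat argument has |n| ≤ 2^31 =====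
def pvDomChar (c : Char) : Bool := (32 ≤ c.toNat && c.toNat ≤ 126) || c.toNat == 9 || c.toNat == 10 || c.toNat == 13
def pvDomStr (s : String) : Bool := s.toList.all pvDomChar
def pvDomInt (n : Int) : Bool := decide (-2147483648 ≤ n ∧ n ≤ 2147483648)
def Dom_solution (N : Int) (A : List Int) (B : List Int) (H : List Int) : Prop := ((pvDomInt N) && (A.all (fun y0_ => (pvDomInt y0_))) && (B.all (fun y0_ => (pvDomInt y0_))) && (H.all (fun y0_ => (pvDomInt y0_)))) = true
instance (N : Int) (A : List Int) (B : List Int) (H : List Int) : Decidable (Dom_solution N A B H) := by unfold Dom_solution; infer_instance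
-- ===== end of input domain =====

-- B replaces A's multi-source BFS (adjacency list + FIFO queue + distance array) by
-- Bellman-Ford style in-place edge relaxation over the raw edge list, with N as infinity;
-- alternative algorithm, not claimed faster.

-- ===== PORT A =====
-- A's pair of lines: city_map[A[i]].append(B[i]); city_map[B[i]].append(A[i])
def pvAddEdge (cm : List (List Int)) (a b : Int) : List (List Int) :=
  let cm1 := PySem.List.pySetD cm a (PySem.List.pyGetD cm a [] ++ [b])
  PySem.List.pySetD cm1 b (PySem.List.pyGetD cm1 b [] ++ [a])

-- body of A's while-loop for one dequeued district (inner for over its neighbours)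
def pvStepA (cm : List (List Int)) (time : List Int) (u : Int) : List Int × List Int :=
  (PySem.List.pyGetD cm u []).foldl
    (fun st v =>
      if PySem.List.pyGetD st.1 v 0 = -1 then
        (PySem.List.pySetD st.1 v (PySem.List.pyGetD st.1 u 0 + 1), st.2 ++ [v])
      else st)
    (time, [])

-- A's while-loop over the growing queue, modelled as head-processing on the pending
-- part of the queue; the Nat argument is a totalisation fuel only (guard, no algorithm change)
def pvBfsA (cm : List (List Int)) : Nat → List Int → List Int → List Int
  | _, time, [] => time
  | 0, time, _ :: _ => time
  | fuel+1, time, u :: rest =>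
      pvBfsA cm fuel (pvStepA cm time u).1 (rest ++ (pvStepA cm time u).2)

-- A's final loop: early return -1, else running maximum
def pvMaxLoop : List Int → Int → Int
  | [], m => m
  | t :: ts, m => if t = -1 then -1 else pvMaxLoop ts (if m < t then t else m)

def solution (N : Int) (A : List Int) (B : List Int) (H : List Int) : Int :=
  let cm0 : List (List Int) := (PySem.List.pyRange 0 N 1).map (fun _ => ([] : List Int))
  let cm := (PySem.List.pyRange 0 (A.length : Int) 1).foldl
      (fun m i => pvAddEdge m (PySem.List.pyGetD A i 0) (PySem.List.pyGetD B i 0)) cm0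
  let init := H.foldl (fun (st : List Int × List Int) h =>
      (PySem.List.pySetD st.1 h 0, st.2 ++ [h])) (List.replicate N.toNat (-1), [])
  pvMaxLoop (pvBfsA cm (H.length + N.toNat) init.1 init.2) 0

-- ===== PORT B =====
-- B's inner loop body: the two in-place relaxations of one undirected edge
def pvRelax (st : List Int × Bool) (p : Int × Int) : List Int × Bool :=
  let st1 := if PySem.List.pyGetD st.1 p.1 0 + 1 < PySem.List.pyGetD st.1 p.2 0 then
      (PySem.List.pySetD st.1 p.2 (PySem.List.pyGetD st.1 p.1 0 + 1), true) else st
  if PySem.List.pyGetD st1.1 p.2 0 + 1 < PySem.List.pyGetD st1.1 p.1 0 then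
      (PySem.List.pySetD st1.1 p.1 (PySem.List.pyGetD st1.1 p.2 0 + 1), true) else st1

-- B's while-changed loop; the Nat argument is a totalisation fuel only (guard)
def pvBF (es : List (Int × Int)) : Nat → List Int → List Int
  | 0, dist => dist
  | fuel+1, dist =>
      let r := es.foldl pvRelax (dist, false)
      if r.2 then pvBF es fuel r.1 else r.1

def solution_alt (N : Int) (A : List Int) (B : List Int) (H : List Int) : Int :=
  let dist0 := H.foldl (fun d h => PySem.List.pySetD d h 0) (List.replicate N.toNat N)
  let dist := pvBF (A.zip B) ((dist0.map Int.toNat).sum + 1) dist0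
  if dist.contains N then -1
  else (PySem.List.max? dist (fun x => x)).getD 0

-- ===== PRECONDITION & SPEC =====
-- Pre_ excludes exactly the inputs on which the Python A raises IndexError:
-- an edge index beyond len(B), or a city index in A, B[:len(A)] or H outside [-N, N).
def Pre_solution (N : Int) (A : List Int) (B : List Int) (H : List Int) : Prop :=
  A.length ≤ B.length ∧
  (∀ x ∈ A, -N ≤ x ∧ x < N) ∧
  (∀ x ∈ B.take A.length, -N ≤ x ∧ x < N) ∧
  (∀ x ∈ H, -N ≤ x ∧ x < N)
instance (N : Int) (A : List Int) (B : List Int) (H : List Int) : Decidable (Pre_solution N A B H) := by unfold Pre_solution; infer_instance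

def pvWitness_solution : Int × List Int × List Int × List Int := (3, [0, 1], [1, 2], [0])

def Spec_solution (N : Int) (A : List Int) (B : List Int) (H : List Int) (out : Int) : Prop := out = solution_alt N A B H
instance (N : Int) (A : List Int) (B : List Int) (H : List Int) (out : Int) : Decidable (Spec_solution N A B H out) := by unfold Spec_solution; infer_instance

-- ===== CLAIM (what is proved, stated in full; the proofs are below) =====
def Claim_equal_solution : Prop := ∀ (N : Int) (A : List Int) (B : List Int) (H : List Int), Dom_solution N A B H → Pre_solution N A B H → Spec_solution N A B H (solution N A B H)

-- ===== LEMMAS AND PROOFS =====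


-- normalised (wrapped) index of a Python index v into a list of length n
def pvJdx (n : Nat) (v : Int) : Nat := if 0 ≤ v then v.toNat else n - (-v).toNat

def pvInR (n : Nat) (v : Int) : Prop := -(n : Int) ≤ v ∧ v < (n : Int)

lemma pvJdx_lt (n : Nat) (v : Int) (h1 : -(n : Int) ≤ v) (h2 : v < (n : Int)) :
    pvJdx n v < n := by
  unfold pvJdx; split <;> omega

lemma pvGet_wrap {α : Type} (xs : List α) (v : Int) (d : α)
    (h1 : -(xs.length : Int) ≤ v) (h2 : v < (xs.length : Int)) :
    PySem.List.pyGetD xs v d = xs.getD (pvJdx xs.length v) d := by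
  simp only [PySem.List.pyGetD, PySem.List.pyGet?, PySem.List.pyIdx?, pvJdx]
  by_cases h0 : 0 ≤ v
  · rw [if_pos h0, if_pos h0, if_pos h2]
    simp [List.getD_eq_getElem?_getD]
  · rw [if_neg h0, if_neg h0, if_pos h1]
    simp [List.getD_eq_getElem?_getD]

lemma pvSet_wrap {α : Type} (xs : List α) (v : Int) (x : α)
    (h1 : -(xs.length : Int) ≤ v) (h2 : v < (xs.length : Int)) :
    PySem.List.pySetD xs v x = xs.set (pvJdx xs.length v) x := by
  simp only [PySem.List.pySetD, PySem.List.pySet?, PySem.List.pyIdx?, pvJdx]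
  by_cases h0 : 0 ≤ v
  · rw [if_pos h0, if_pos h0, if_pos h2]; simp
  · rw [if_neg h0, if_neg h0, if_pos h1]; simp

lemma pvSetD_length {α : Type} (xs : List α) (v : Int) (x : α) :
    (PySem.List.pySetD xs v x).length = xs.length := by
  simp only [PySem.List.pySetD, PySem.List.pySet?]
  cases PySem.List.pyIdx? xs.length v <;> simp

lemma pvGetD_eq_getElem {α : Type} (xs : List α) (k : Nat) (d : α) (h : k < xs.length) :
    xs.getD k d = xs[k] := by
  simp [List.getD_eq_getElem?_getD, List.getElem?_eq_getElem h]

lemma pvGetD_set_self {α : Type} (xs : List α) (i : Nat) (v d : α) (h : i < xs.length) :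
    (xs.set i v).getD i d = v := by
  rw [pvGetD_eq_getElem _ _ _ (by simpa using h)]
  simp [List.getElem_set_self]

lemma pvGetD_set_ne {α : Type} (xs : List α) (i k : Nat) (v d : α) (h : i ≠ k) :
    (xs.set i v).getD k d = xs.getD k d := by
  simp [List.getD_eq_getElem?_getD, List.getElem?_set_ne h]

-- number of still-unreached entries
def pvCnt (t : List Int) : Nat := t.countP (fun x => decide (x = -1))

lemma pvCnt_le (t : List Int) : pvCnt t ≤ t.length := List.countP_le_length

lemma pvCnt_set (xs : List Int) (i : Nat) (v : Int) (hi : i < xs.length)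
    (hold : xs.getD i 0 = -1) (hv : v ≠ -1) :
    pvCnt (xs.set i v) + 1 = pvCnt xs := by
  unfold pvCnt
  rw [List.countP_set hi]
  rw [pvGetD_eq_getElem _ _ _ hi] at hold
  have hpos : 0 < xs.countP (fun x => decide (x = -1)) := by
    rw [List.countP_pos_iff]
    exact ⟨xs[i], List.getElem_mem hi, by simp [hold]⟩
  simp [hold, hv]
  omega

lemma pvCnt_lt_of_marked (xs : List Int) (j : Nat) (hj : j < xs.length)
    (h : xs.getD j 0 ≠ -1) : pvCnt xs + 1 ≤ xs.length := by
  unfold pvCnt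
  have h1 : xs.countP (fun x => decide (x = -1)) = (xs.filter (fun x => decide (x = -1))).length :=
    List.countP_eq_length_filter
  have hx : xs.getD j 0 = xs[j] := by
    simp [List.getD_eq_getElem?_getD, List.getElem?_eq_getElem hj]
  have h2 : (xs.filter (fun x => decide (x = -1))).length < xs.length := by
    rw [List.length_filter_lt_length_iff_exists]
    refine ⟨xs[j], List.getElem_mem hj, ?_⟩
    rw [← hx]
    simpa using h
  omega

-- invisible-to-the-ports fold reassociation: a pair fold whose second component only accumulates
lemma pvFoldlPairAcc {β γ : Type} (g : γ → β → γ) (h : γ → β → List Int) :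
    ∀ (vs : List β) (s : γ) (w : List Int),
      vs.foldl (fun st v => (g st.1 v, st.2 ++ h st.1 v)) (s, w)
        = ((vs.foldl (fun st v => (g st.1 v, st.2 ++ h st.1 v)) (s, [])).1,
           w ++ (vs.foldl (fun st v => (g st.1 v, st.2 ++ h st.1 v)) (s, [])).2) := by
  intro vs
  induction vs with
  | nil => intro s w; simp
  | cons v vs ih =>
    intro s w
    simp only [List.foldl_cons]
    rw [ih (g s v) (w ++ h s v), ih (g s v) ([] ++ h s v)]
    simp

-- shaped forms of A's inner per-neighbour update
def pvGA (u : Int) (t : List Int) (v : Int) : List Int :=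
  if PySem.List.pyGetD t v 0 = -1 then PySem.List.pySetD t v (PySem.List.pyGetD t u 0 + 1) else t
def pvHA (t : List Int) (v : Int) : List Int :=
  if PySem.List.pyGetD t v 0 = -1 then [v] else []

lemma pvStepA_shape (cm : List (List Int)) (time : List Int) (u : Int) :
    pvStepA cm time u
      = (PySem.List.pyGetD cm u []).foldl
          (fun st v => (pvGA u st.1 v, st.2 ++ pvHA st.1 v)) (time, []) := by
  unfold pvStepA
  congr 1
  funext st v
  unfold pvGA pvHA
  split <;> simp

-- the expansion of a whole level on A's side (proof abstraction, not a port)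
def pvExpandA (cm : List (List Int)) (time : List Int) (F : List Int) : List Int × List Int :=
  F.foldl (fun st u => ((pvStepA cm st.1 u).1, st.2 ++ (pvStepA cm st.1 u).2)) (time, [])

lemma pvExpandA_cons (cm : List (List Int)) (time : List Int) (u : Int) (F' : List Int) :
    pvExpandA cm time (u :: F')
      = ((pvExpandA cm (pvStepA cm time u).1 F').1,
         (pvStepA cm time u).2 ++ (pvExpandA cm (pvStepA cm time u).1 F').2) := by
  unfold pvExpandA
  simp only [List.foldl_cons]
  rw [pvFoldlPairAcc (fun t u' => (pvStepA cm t u').1) (fun t u' => (pvStepA cm t u').2)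
        F' (pvStepA cm time u).1 ([] ++ (pvStepA cm time u).2)]
  simp

-- A's queue processes a whole level exactly as one pvExpandA
lemma pvLevelStep (cm : List (List Int)) :
    ∀ (F : List Int) (fuel : Nat) (time : List Int) (acc : List Int),
      pvBfsA cm (F.length + fuel) time (F ++ acc)
        = pvBfsA cm fuel (pvExpandA cm time F).1 (acc ++ (pvExpandA cm time F).2) := by
  intro F
  induction F with
  | nil => intro fuel time acc; simp [pvExpandA]
  | cons u F' ih =>
    intro fuel time acc
    have hlen : (u :: F').length + fuel = (F'.length + fuel) + 1 := by
      simp [List.length_cons]; omega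
    rw [hlen]
    show pvBfsA cm (F'.length + fuel) (pvStepA cm time u).1 ((F' ++ acc) ++ (pvStepA cm time u).2)
        = _
    rw [List.append_assoc]
    rw [ih fuel (pvStepA cm time u).1 (acc ++ (pvStepA cm time u).2)]
    rw [pvExpandA_cons]
    simp [List.append_assoc]

lemma pvMaxLoop_neg : ∀ (xs : List Int) (m : Int), -1 ∈ xs → pvMaxLoop xs m = -1 := by
  intro xs
  induction xs with
  | nil => simp
  | cons t ts ih =>
    intro m hm
    by_cases ht : t = -1
    · simp [pvMaxLoop, ht]
    · have hts : -1 ∈ ts := by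
        rcases List.mem_cons.mp hm with h | h
        · exact absurd h.symm ht
        · exact h
      simp [pvMaxLoop, ht, ih _ hts]

lemma pvMaxLoop_no_neg : ∀ (xs : List Int) (m : Int), -1 ∉ xs →
    pvMaxLoop xs m = xs.foldl (fun a t => if a < t then t else a) m := by
  intro xs
  induction xs with
  | nil => simp [pvMaxLoop]
  | cons t ts ih =>
    intro m hm
    have ht : t ≠ -1 := by intro h; exact hm (by simp [h])
    have hts : -1 ∉ ts := by intro h; exact hm (by simp [h])
    simp [pvMaxLoop, ht, ih _ hts]

lemma pvBfsA_nil (cm : List (List Int)) (fa : Nat) (time : List Int) :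
    pvBfsA cm fa time [] = time := by cases fa <;> rfl

-- the two ports traverse the edge pairs identically; name the range-indexed fold as a zip fold
lemma pvBuildEq (A B : List Int) (h : A.length ≤ B.length) (c0 : List (List Int)) :
    (PySem.List.pyRange 0 (A.length : Int) 1).foldl
        (fun m i => pvAddEdge m (PySem.List.pyGetD A i 0) (PySem.List.pyGetD B i 0)) c0
      = (A.zip B).foldl (fun m p => pvAddEdge m p.1 p.2) c0 := by
  have hmap : (PySem.List.pyRange 0 (A.length : Int) 1).map
      (fun i => (PySem.List.pyGetD A i 0, PySem.List.pyGetD B i 0)) = A.zip B := by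
    apply List.ext_getElem
    · simp [PySem.List.length_pyRange_one]; omega
    · intro i h1 h2
      have hiA : i < A.length := by
        simpa [PySem.List.length_pyRange_one] using h1
      have hiB : i < B.length := by omega
      rw [List.getElem_map, PySem.List.getElem_pyRange_one]
      rw [List.getElem_zip]
      have : ((0 : Int) + (i : Int)) = ((i : Nat) : Int) := by ring
      rw [this]
      simp [PySem.List.pyGetD_natCast, List.getD_eq_getElem?_getD, List.getElem?_eq_getElem hiA, List.getElem?_eq_getElem hiB]
  rw [← hmap, List.foldl_map]

-- the neighbour list of node j in the built adjacency structure
def pvNbh (cm : List (List Int)) (j : Nat) : List Int := cm.getD j []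

-- `reachable from a hospital in at most k steps', defined from the inputs alone
def pvReach (cm : List (List Int)) (n : Nat) (H : List Int) : Nat → Nat → Prop
  | 0, j => ∃ h ∈ H, pvJdx n h = j
  | k+1, j => pvReach cm n H k j ∨
      ∃ j', j' < n ∧ pvReach cm n H k j' ∧ ∃ v ∈ pvNbh cm j', pvJdx n v = j

def pvLR (cm : List (List Int)) (n : Nat) (H : List Int) (j e : Nat) : Prop :=
  pvReach cm n H e j ∧ ∀ e' < e, ¬ pvReach cm n H e' j

lemma pvReach_mono (cm : List (List Int)) (n : Nat) (H : List Int) :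
    ∀ (k m j : Nat), k ≤ m → pvReach cm n H k j → pvReach cm n H m j := by
  intro k m
  induction m with
  | zero => intro j hk h; have : k = 0 := by omega
            subst this; exact h
  | succ m ih =>
    intro j hk h
    by_cases hkm : k = m + 1
    · subst hkm; exact h
    · exact Or.inl (ih j (by omega) h)

lemma pvReach_nilH (cm : List (List Int)) (n : Nat) :
    ∀ (k j : Nat), ¬ pvReach cm n ([] : List Int) k j := by
  intro k
  induction k with
  | zero => intro j h; obtain ⟨h0, hm, _⟩ := h; simp at hm
  | succ k ih =>
    intro j h
    rcases h with h | ⟨j', _, hr, _⟩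
    · exact ih j h
    · exact ih j' hr

-- one-step stability of the reachable-set propagates to all levels
lemma pvReach_stab (cm : List (List Int)) (n : Nat) (H : List Int)
    (hH : ∀ h ∈ H, pvInR n h)
    (hnb : ∀ j, j < n → ∀ v ∈ pvNbh cm j, pvInR n v)
    (d : Nat) (hst : ∀ j, j < n → pvReach cm n H (d+1) j → pvReach cm n H d j) :
    ∀ (k j : Nat), pvReach cm n H k j → pvReach cm n H d j := by
  have key : ∀ (m j : Nat), pvReach cm n H (d + m) j → pvReach cm n H d j := by
    intro m
    induction m with
    | zero => intro j h; exact h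
    | succ m ih =>
      intro j h
      rcases h with h | ⟨j', hj', hr, v, hv, hjv⟩
      · exact ih j h
      · have hrd : pvReach cm n H d j' := ih j' hr
        have hjn : j < n := hjv ▸ pvJdx_lt n v (hnb j' hj' v hv).1 (hnb j' hj' v hv).2
        exact hst j hjn (Or.inr ⟨j', hj', hrd, v, hv, hjv⟩)
  intro k j h
  exact key k j (pvReach_mono cm n H k (d+k) j (by omega) h)

-- characterisation of the final per-node array: -1 for unreachable, least level otherwise
def pvChar (cm : List (List Int)) (n : Nat) (H : List Int) (T : List Int) : Prop :=
  T.length = n ∧ ∀ j, j < n →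
    (T.getD j 0 = -1 ∧ ∀ k, ¬ pvReach cm n H k j) ∨
    (∃ e : Nat, T.getD j 0 = (e : Int) ∧ pvLR cm n H j e ∧ e + 1 ≤ n)

-- the BFS loop invariant, entering level d with frontier F and array T
def pvInv (cm : List (List Int)) (n : Nat) (H : List Int)
    (d : Nat) (T : List Int) (F : List Int) : Prop :=
  T.length = n ∧
  (∀ u ∈ F, pvInR n u ∧ T.getD (pvJdx n u) 0 = (d : Int)) ∧
  (∀ j, j < n → (T.getD j 0 ≠ -1 ↔ pvReach cm n H d j)) ∧
  (∀ j, j < n → ∀ e : Nat, T.getD j 0 = (e : Int) → pvLR cm n H j e ∧ e ≤ d ∧ e + 1 ≤ n) ∧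
  (∀ j, j < n → T.getD j 0 = -1 ∨ ∃ e : Nat, T.getD j 0 = (e : Int)) ∧
  (∀ j, j < n → pvLR cm n H j d → ∃ u ∈ F, pvJdx n u = j) ∧
  (F ≠ [] → d + pvCnt T + 1 ≤ n)

-- A's inner fold over one neighbour list, against the spec
lemma pvInnerA (n : Nat) (u : Int) (d : Nat) (hu : pvInR n u) :
    ∀ (vs T : List Int), (∀ v ∈ vs, pvInR n v) → T.length = n →
      T.getD (pvJdx n u) 0 = (d : Int) →
      (let r := vs.foldl (fun st v => (pvGA u st.1 v, st.2 ++ pvHA st.1 v)) (T, ([] : List Int));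
       r.1.length = n ∧
       (∀ j, j < n → r.1.getD j 0 = T.getD j 0 ∨
          (T.getD j 0 = -1 ∧ r.1.getD j 0 = (d : Int) + 1)) ∧
       (∀ j, j < n → (r.1.getD j 0 ≠ -1 ↔ (T.getD j 0 ≠ -1 ∨ ∃ v ∈ vs, pvJdx n v = j))) ∧
       (∀ j, j < n → ((∃ w ∈ r.2, pvJdx n w = j) ↔
          (T.getD j 0 = -1 ∧ ∃ v ∈ vs, pvJdx n v = j))) ∧
       (∀ w ∈ r.2, pvInR n w) ∧
       pvCnt r.1 + r.2.length = pvCnt T ∧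
       (r.2 = [] → r.1 = T)) := by
  intro vs
  induction vs with
  | nil =>
    intro T hvs hT hTu
    refine ⟨hT, fun j _ => Or.inl rfl, ?_, ?_, by simp, by simp, fun _ => rfl⟩
    · intro j hj; simp
    · intro j hj; simp
  | cons v vs ih =>
    intro T hvs hT hTu
    have hInRv := hvs v (by simp)
    have hjv : pvJdx n v < n := pvJdx_lt n v hInRv.1 hInRv.2
    have hgv : PySem.List.pyGetD T v 0 = T.getD (pvJdx n v) 0 := by
      rw [pvGet_wrap T v 0 (by rw [hT]; exact hInRv.1) (by rw [hT]; exact hInRv.2), hT]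
    by_cases hvis : T.getD (pvJdx n v) 0 = -1
    · -- unmarked: mark with d+1, append v
      have hgu : PySem.List.pyGetD T u 0 = (d : Int) := by
        rw [pvGet_wrap T u 0 (by rw [hT]; exact hu.1) (by rw [hT]; exact hu.2), hT, hTu]
      have eA : pvGA u T v = T.set (pvJdx n v) ((d : Int) + 1) := by
        unfold pvGA
        rw [hgv, if_pos hvis, hgu,
          pvSet_wrap T v _ (by rw [hT]; exact hInRv.1) (by rw [hT]; exact hInRv.2), hT]
      have eH : pvHA T v = [v] := by unfold pvHA; rw [hgv, if_pos hvis]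
      set T1 := T.set (pvJdx n v) ((d : Int) + 1) with hT1def
      have hT1 : T1.length = n := by simp [hT1def, hT]
      have hT1u : T1.getD (pvJdx n u) 0 = (d : Int) := by
        have hne : pvJdx n v ≠ pvJdx n u := by
          intro h; rw [h, hTu] at hvis; omega
        rw [hT1def, pvGetD_set_ne _ _ _ _ _ hne]; exact hTu
      obtain ⟨d1, d2, d3, d4, d5, d6, d7⟩ :=
        ih T1 (fun x hx => hvs x (by simp [hx])) hT1 hT1u
      simp only [List.foldl_cons, eA, eH, List.nil_append, ← hT1def]
      rw [pvFoldlPairAcc (pvGA u) pvHA vs T1 [v]]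
      have hT1get : ∀ j, j < n → T1.getD j 0 = if pvJdx n v = j then (d : Int) + 1 else T.getD j 0 := by
        intro j hj
        by_cases hvj : pvJdx n v = j
        · subst hvj; rw [hT1def, pvGetD_set_self _ _ _ _ (by omega)]; simp
        · rw [hT1def, pvGetD_set_ne _ _ _ _ _ hvj]; simp [hvj]
      refine ⟨d1, ?_, ?_, ?_, ?_, ?_, ?_⟩
      · intro j hj
        rcases d2 j hj with h | h
        · rw [h, hT1get j hj]
          by_cases hvj : pvJdx n v = j
          · subst hvj; exact Or.inr ⟨hvis, by simp⟩
          · simp [hvj]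
        · right
          refine ⟨?_, h.2⟩
          rw [hT1get j hj] at h
          by_cases hvj : pvJdx n v = j
          · subst hvj; exact hvis
          · simpa [hvj] using h.1
      · intro j hj
        rw [d3 j hj, hT1get j hj]
        by_cases hvj : pvJdx n v = j
        · subst hvj
          constructor
          · intro _; exact Or.inr ⟨v, by simp⟩
          · intro _; left; intro hc; omega
        · simp only [if_neg hvj]
          constructor
          · rintro (h | ⟨v', hv', hj'⟩)
            · exact Or.inl h
            · exact Or.inr ⟨v', by simp [hv'], hj'⟩
          · rintro (h | ⟨v', hv', hj'⟩)
            · exact Or.inl h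
            · rcases List.mem_cons.mp hv' with rfl | hv''
              · exact absurd hj' hvj
              · exact Or.inr ⟨v', hv'', hj'⟩
      · intro j hj
        constructor
        · rintro ⟨w, hw, hjw⟩
          rcases List.mem_cons.mp hw with rfl | hw'
          · exact ⟨hjw ▸ hvis, w, by simp, hjw⟩
          · obtain ⟨hT1j, v', hv', hj'⟩ := (d4 j hj).mp ⟨w, hw', hjw⟩
            rw [hT1get j hj] at hT1j
            by_cases hvj : pvJdx n v = j
            · rw [if_pos hvj] at hT1j; omega
            · rw [if_neg hvj] at hT1j
              exact ⟨hT1j, v', by simp [hv'], hj'⟩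
        · rintro ⟨hTj, v', hv', hj'⟩
          by_cases hvj : pvJdx n v = j
          · exact ⟨v, by simp, hvj⟩
          · rcases List.mem_cons.mp hv' with rfl | hv''
            · exact absurd hj' hvj
            · have : ∃ w ∈ (vs.foldl (fun st v => (pvGA u st.1 v, st.2 ++ pvHA st.1 v)) (T1, ([] : List Int))).2, pvJdx n w = j := by
                apply (d4 j hj).mpr
                refine ⟨?_, v', hv'', hj'⟩
                rw [hT1get j hj, if_neg hvj]; exact hTj
              obtain ⟨w, hw, hjw⟩ := this
              exact ⟨w, by simp [hw], hjw⟩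
      · intro w hw
        rcases List.mem_cons.mp hw with rfl | hw'
        · exact hInRv
        · exact d5 w hw'
      · have hc : pvCnt T1 + 1 = pvCnt T :=
          pvCnt_set T (pvJdx n v) _ (by omega) hvis (by omega)
        simp only [List.length_append, List.length_cons, List.length_nil]
        omega
      · intro h; simp at h
    · -- already marked: skip
      have eA : pvGA u T v = T := by unfold pvGA; rw [hgv, if_neg hvis]
      have eH : pvHA T v = [] := by unfold pvHA; rw [hgv, if_neg hvis]
      simp only [List.foldl_cons, eA, eH, List.append_nil]
      obtain ⟨d1, d2, d3, d4, d5, d6, d7⟩ :=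
        ih T (fun x hx => hvs x (by simp [hx])) hT hTu
      refine ⟨d1, d2, ?_, ?_, d5, d6, d7⟩
      · intro j hj
        rw [d3 j hj]
        constructor
        · rintro (h | ⟨v', hv', hj'⟩)
          · exact Or.inl h
          · exact Or.inr ⟨v', by simp [hv'], hj'⟩
        · rintro (h | ⟨v', hv', hj'⟩)
          · exact Or.inl h
          · rcases List.mem_cons.mp hv' with rfl | hv''
            · exact Or.inl (hj' ▸ hvis)
            · exact Or.inr ⟨v', hv'', hj'⟩
      · intro j hj
        rw [d4 j hj]
        constructor
        · rintro ⟨hTj, v', hv', hj'⟩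
          exact ⟨hTj, v', by simp [hv'], hj'⟩
        · rintro ⟨hTj, v', hv', hj'⟩
          rcases List.mem_cons.mp hv' with rfl | hv''
          · rw [← hj'] at hTj
            exact absurd hTj hvis
          · exact ⟨hTj, v', hv'', hj'⟩

-- A's whole-level expansion, against the spec
lemma pvOuterA (cm : List (List Int)) (n : Nat) (d : Nat)
    (hcml : cm.length = n)
    (hnb : ∀ j, j < n → ∀ v ∈ pvNbh cm j, pvInR n v) :
    ∀ (F T : List Int),
      (∀ u ∈ F, pvInR n u ∧ T.getD (pvJdx n u) 0 = (d : Int)) → T.length = n →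
      (let r := pvExpandA cm T F;
       r.1.length = n ∧
       (∀ j, j < n → r.1.getD j 0 = T.getD j 0 ∨
          (T.getD j 0 = -1 ∧ r.1.getD j 0 = (d : Int) + 1)) ∧
       (∀ j, j < n → (r.1.getD j 0 ≠ -1 ↔ (T.getD j 0 ≠ -1 ∨
          ∃ u ∈ F, ∃ v ∈ pvNbh cm (pvJdx n u), pvJdx n v = j))) ∧
       (∀ j, j < n → ((∃ w ∈ r.2, pvJdx n w = j) ↔
          (T.getD j 0 = -1 ∧ ∃ u ∈ F, ∃ v ∈ pvNbh cm (pvJdx n u), pvJdx n v = j))) ∧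
       (∀ w ∈ r.2, pvInR n w) ∧
       pvCnt r.1 + r.2.length = pvCnt T ∧
       (r.2 = [] → r.1 = T)) := by
  intro F
  induction F with
  | nil =>
    intro T hF hT
    refine ⟨hT, fun j _ => Or.inl rfl, ?_, ?_, by simp [pvExpandA], by simp [pvExpandA],
      fun _ => rfl⟩
    · intro j hj; simp [pvExpandA]
    · intro j hj; simp [pvExpandA]
  | cons u F' ih =>
    intro T hF hT
    have hu := (hF u (by simp)).1
    have hju : pvJdx n u < n := pvJdx_lt n u hu.1 hu.2
    have hnbu : PySem.List.pyGetD cm u [] = pvNbh cm (pvJdx n u) := by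
      rw [pvGet_wrap cm u [] (by rw [hcml]; exact hu.1) (by rw [hcml]; exact hu.2), hcml]
      rfl
    have hvsInR : ∀ v ∈ pvNbh cm (pvJdx n u), pvInR n v := hnb _ hju
    obtain ⟨e1, e2, e3, e4, e5, e6, e7⟩ :=
      pvInnerA n u d hu (pvNbh cm (pvJdx n u)) T hvsInR hT (hF u (by simp)).2
    have hstep : pvStepA cm T u
        = (pvNbh cm (pvJdx n u)).foldl
            (fun st v => (pvGA u st.1 v, st.2 ++ pvHA st.1 v)) (T, ([] : List Int)) := by
      rw [pvStepA_shape, hnbu]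
    rw [← hstep] at e1 e2 e3 e4 e5 e6 e7
    set T1 := (pvStepA cm T u).1 with hT1def
    set W1 := (pvStepA cm T u).2 with hW1def
    have hF' : ∀ u' ∈ F', pvInR n u' ∧ T1.getD (pvJdx n u') 0 = (d : Int) := by
      intro u' hu'
      obtain ⟨h1, h2⟩ := hF u' (by simp [hu'])
      refine ⟨h1, ?_⟩
      rcases e2 (pvJdx n u') (pvJdx_lt n u' h1.1 h1.2) with h | h
      · rw [h]; exact h2
      · rw [h2] at h; omega
    obtain ⟨f1, f2, f3, f4, f5, f6, f7⟩ := ih T1 hF' e1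
    rw [pvExpandA_cons]
    simp only [← hT1def, ← hW1def]
    refine ⟨f1, ?_, ?_, ?_, ?_, ?_, ?_⟩
    · intro j hj
      rcases f2 j hj with h | h
      · rcases e2 j hj with h' | h'
        · exact Or.inl (by rw [h, h'])
        · exact Or.inr ⟨h'.1, by rw [h, h'.2]⟩
      · rcases e2 j hj with h' | h'
        · exact Or.inr ⟨by rw [← h', h.1], h.2⟩
        · exact Or.inr ⟨h'.1, h.2⟩
    · intro j hj
      rw [f3 j hj, e3 j hj]
      constructor
      · rintro ((h | ⟨v, hv, hjv⟩) | ⟨u', hu', v, hv, hjv⟩)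
        · exact Or.inl h
        · exact Or.inr ⟨u, by simp, v, hv, hjv⟩
        · exact Or.inr ⟨u', by simp [hu'], v, hv, hjv⟩
      · rintro (h | ⟨u', hu', v, hv, hjv⟩)
        · exact Or.inl (Or.inl h)
        · rcases List.mem_cons.mp hu' with rfl | hu''
          · exact Or.inl (Or.inr ⟨v, hv, hjv⟩)
          · exact Or.inr ⟨u', hu'', v, hv, hjv⟩
    · intro j hj
      constructor
      · rintro ⟨w, hw, hjw⟩
        rcases List.mem_append.mp hw with hw1 | hw2
        · obtain ⟨hTj, v, hv, hjv⟩ := (e4 j hj).mp ⟨w, hw1, hjw⟩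
          exact ⟨hTj, u, by simp, v, hv, hjv⟩
        · obtain ⟨hT1j, u', hu', v, hv, hjv⟩ := (f4 j hj).mp ⟨w, hw2, hjw⟩
          rcases e2 j hj with h | h
          · rw [h] at hT1j
            exact ⟨hT1j, u', by simp [hu'], v, hv, hjv⟩
          · rw [h.2] at hT1j; omega
      · rintro ⟨hTj, u', hu', v, hv, hjv⟩
        rcases List.mem_cons.mp hu' with rfl | hu''
        · obtain ⟨w, hw, hjw⟩ := (e4 j hj).mpr ⟨hTj, v, hv, hjv⟩
          exact ⟨w, List.mem_append.mpr (Or.inl hw), hjw⟩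
        · by_cases hT1j : T1.getD j 0 = -1
          · obtain ⟨w, hw, hjw⟩ := (f4 j hj).mpr ⟨hT1j, u', hu'', v, hv, hjv⟩
            exact ⟨w, List.mem_append.mpr (Or.inr hw), hjw⟩
          · have : T.getD j 0 ≠ -1 ∨ ∃ v' ∈ pvNbh cm (pvJdx n u), pvJdx n v' = j :=
              (e3 j hj).mp hT1j
            rcases this with h | ⟨v', hv', hjv'⟩
            · exact absurd hTj h
            · obtain ⟨w, hw, hjw⟩ := (e4 j hj).mpr ⟨hTj, v', hv', hjv'⟩
              exact ⟨w, List.mem_append.mpr (Or.inl hw), hjw⟩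
    · intro w hw
      rcases List.mem_append.mp hw with h | h
      · exact e5 w h
      · exact f5 w h
    · simp only [List.length_append]
      omega
    · intro h
      rcases List.append_eq_nil_iff.mp h with ⟨h1, h2⟩
      rw [f7 h2, e7 h1]

lemma pvStabChar (cm : List (List Int)) (n : Nat) (H : List Int)
    (d : Nat) (T F : List Int) (hInv : pvInv cm n H d T F)
    (hH : ∀ h ∈ H, pvInR n h)
    (hnb : ∀ j, j < n → ∀ v ∈ pvNbh cm j, pvInR n v)
    (hst : ∀ j, j < n → pvReach cm n H (d+1) j → pvReach cm n H d j) :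
    pvChar cm n H T := by
  obtain ⟨h1, _, h3, h4, h5, _, _⟩ := hInv
  refine ⟨h1, ?_⟩
  intro j hj
  rcases h5 j hj with h | ⟨e, he⟩
  · left
    refine ⟨h, ?_⟩
    intro k hk
    have hrd : pvReach cm n H d j := pvReach_stab cm n H hH hnb d hst k j hk
    exact (h3 j hj).mpr hrd h
  · right
    obtain ⟨hlr, _, hen⟩ := h4 j hj e he
    exact ⟨e, he, hlr, hen⟩

-- an empty next frontier means the reachable set is already closed at level d
lemma pvStabOfEmpty (cm : List (List Int)) (n : Nat) (H : List Int)
    (d : Nat) (T F : List Int) (hInv : pvInv cm n H d T F)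
    (hempty : ∀ j, j < n →
      ¬ (T.getD j 0 = -1 ∧ ∃ u ∈ F, ∃ v ∈ pvNbh cm (pvJdx n u), pvJdx n v = j)) :
    ∀ j, j < n → pvReach cm n H (d+1) j → pvReach cm n H d j := by
  obtain ⟨h1, h2, h3, h4, h5, h6, _⟩ := hInv
  intro j hj hr
  by_contra hnd
  rcases hr with hr | ⟨j', hj', hrj', v, hv, hjv⟩
  · exact hnd hr
  · have hTj : T.getD j 0 = -1 := by
      by_contra hc
      exact hnd ((h3 j hj).mp hc)
    have hTj' : T.getD j' 0 ≠ -1 := (h3 j' hj').mpr hrj'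
    rcases h5 j' hj' with h | ⟨e', he'⟩
    · exact hTj' h
    · obtain ⟨hlr', hed, _⟩ := h4 j' hj' e' he'
      have he'd : e' = d := by
        by_contra hne
        have : pvReach cm n H (e'+1) j := Or.inr ⟨j', hj', hlr'.1, v, hv, hjv⟩
        exact hnd (pvReach_mono cm n H (e'+1) d j (by omega) this)
      obtain ⟨u, hu, hju⟩ := h6 j' hj' (he'd ▸ hlr')
      exact hempty j hj ⟨hTj, u, hu, v, by rw [hju]; exact hv, hjv⟩

-- the fuelled BFS queue loop establishes the characterisation
lemma pvRunA (cm : List (List Int)) (n : Nat) (H : List Int)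
    (hcml : cm.length = n)
    (hH : ∀ h ∈ H, pvInR n h)
    (hnb : ∀ j, j < n → ∀ v ∈ pvNbh cm j, pvInR n v) :
    ∀ (c : Nat) (T F : List Int) (d fuel : Nat), pvCnt T ≤ c →
      pvInv cm n H d T F → F ≠ [] → F.length + pvCnt T ≤ fuel →
      pvChar cm n H (pvBfsA cm fuel T F) := by
  intro c
  induction c with
  | zero =>
    intro T F d fuel hc hInv hF hfuel
    obtain ⟨e1, e2, e3, e4, e5, e6, e7⟩ :=
      pvOuterA cm n d hcml hnb F T hInv.2.1 hInv.1
    have hA : pvBfsA cm fuel T F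
        = pvBfsA cm (fuel - F.length) (pvExpandA cm T F).1 ((pvExpandA cm T F).2) := by
      have h0 : pvBfsA cm fuel T F
          = pvBfsA cm (F.length + (fuel - F.length)) T (F ++ []) := by
        have : F.length + (fuel - F.length) = fuel := by
          have := List.length_pos_iff.mpr hF
          omega
        rw [this]; simp
      rw [h0, pvLevelStep]; simp
    rcases hW : (pvExpandA cm T F).2 with _ | ⟨w, W'⟩
    · rw [hA, hW, pvBfsA_nil, e7 hW]
      exact pvStabChar cm n H d T F hInv hH hnb
        (pvStabOfEmpty cm n H d T F hInv (by
          intro j hj hcon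
          have := (e4 j hj).mpr hcon
          rw [hW] at this
          simpa using this))
    · exfalso
      have : pvCnt T = 0 := by omega
      rw [hW] at e6
      simp at e6
      omega
  | succ c ih =>
    intro T F d fuel hc hInv hF hfuel
    obtain ⟨e1, e2, e3, e4, e5, e6, e7⟩ :=
      pvOuterA cm n d hcml hnb F T hInv.2.1 hInv.1
    have hA : pvBfsA cm fuel T F
        = pvBfsA cm (fuel - F.length) (pvExpandA cm T F).1 ((pvExpandA cm T F).2) := by
      have h0 : pvBfsA cm fuel T F
          = pvBfsA cm (F.length + (fuel - F.length)) T (F ++ []) := by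
        have : F.length + (fuel - F.length) = fuel := by
          have := List.length_pos_iff.mpr hF
          omega
        rw [this]; simp
      rw [h0, pvLevelStep]; simp
    obtain ⟨i1, i2, i3, i4, i5, i6, i7⟩ := hInv
    by_cases hW : (pvExpandA cm T F).2 = []
    · rw [hA, hW, pvBfsA_nil, e7 hW]
      exact pvStabChar cm n H d T F ⟨i1, i2, i3, i4, i5, i6, i7⟩ hH hnb
        (pvStabOfEmpty cm n H d T F ⟨i1, i2, i3, i4, i5, i6, i7⟩ (by
          intro j hj hcon
          have := (e4 j hj).mpr hcon
          rw [hW] at this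
          simpa using this))
    · -- the new frontier is non-empty: one level deeper
      set T' := (pvExpandA cm T F).1 with hT'def
      set W := (pvExpandA cm T F).2 with hWdef
      have hWlen : 1 ≤ W.length := by
        cases hWc : W with
        | nil => exact absurd hWc hW
        | cons _ _ => simp [hWc]
      -- new (3rd): marked in T' ↔ reachable in d+1
      have n3 : ∀ j, j < n → (T'.getD j 0 ≠ -1 ↔ pvReach cm n H (d+1) j) := by
        intro j hj
        rw [e3 j hj]
        constructor
        · rintro (h | ⟨u, hu, v, hv, hjv⟩)
          · exact Or.inl ((i3 j hj).mp h)
          · have hu' := i2 u hu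
            have hju : pvJdx n u < n := pvJdx_lt n u hu'.1.1 hu'.1.2
            have hrju : pvReach cm n H d (pvJdx n u) :=
              (i3 _ hju).mp (by rw [hu'.2]; intro hcon; omega)
            exact Or.inr ⟨pvJdx n u, hju, hrju, v, hv, hjv⟩
        · rintro (h | ⟨j', hj', hrj', v, hv, hjv⟩)
          · exact Or.inl ((i3 j hj).mpr h)
          · have hTj' : T.getD j' 0 ≠ -1 := (i3 j' hj').mpr hrj'
            rcases i5 j' hj' with h | ⟨e', he'⟩
            · exact absurd h hTj'
            · obtain ⟨hlr', hed, _⟩ := i4 j' hj' e' he'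
              by_cases he'd : e' = d
              · obtain ⟨u, hu, hju⟩ := i6 j' hj' (he'd ▸ hlr')
                exact Or.inr ⟨u, hu, v, by rw [hju]; exact hv, hjv⟩
              · have : pvReach cm n H (e'+1) j := Or.inr ⟨j', hj', hlr'.1, v, hv, hjv⟩
                exact Or.inl ((i3 j hj).mpr
                  (pvReach_mono cm n H (e'+1) d j (by omega) this))
      -- frontier values in T'
      have n2 : ∀ w ∈ W, pvInR n w ∧ T'.getD (pvJdx n w) 0 = ((d+1 : Nat) : Int) := by
        intro w hw
        have hInRw := e5 w hw
        have hjw : pvJdx n w < n := pvJdx_lt n w hInRw.1 hInRw.2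
        obtain ⟨hTj, hnbr⟩ := (e4 (pvJdx n w) hjw).mp ⟨w, hw, rfl⟩
        rcases e2 (pvJdx n w) hjw with h | h
        · exfalso
          have : T'.getD (pvJdx n w) 0 ≠ -1 := (e3 _ hjw).mpr (Or.inr hnbr)
          rw [h] at this
          exact this hTj
        · refine ⟨hInRw, ?_⟩
          rw [h.2]
          push_cast
          ring
      -- new count bound
      have n7 : (d+1) + pvCnt T' + 1 ≤ n := by
        have := i7 hF
        omega
      -- new least-level facts
      have n4 : ∀ j, j < n → ∀ e : Nat, T'.getD j 0 = (e : Int) →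
          pvLR cm n H j e ∧ e ≤ d + 1 ∧ e + 1 ≤ n := by
        intro j hj e he
        rcases e2 j hj with h | h
        · rw [h] at he
          obtain ⟨hlr, hed, hen⟩ := i4 j hj e he
          exact ⟨hlr, by omega, hen⟩
        · have hed1 : e = d + 1 := by
            rw [h.2] at he
            omega
          subst hed1
          have hr : pvReach cm n H (d+1) j := by
            apply (n3 j hj).mp
            rw [he]
            intro hc
            omega
          refine ⟨⟨hr, ?_⟩, le_refl _, by omega⟩
          intro e' he' hre'
          have : pvReach cm n H d j := pvReach_mono cm n H e' d j (by omega) hre'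
          exact ((i3 j hj).mpr this) h.1
      have n5 : ∀ j, j < n → T'.getD j 0 = -1 ∨ ∃ e : Nat, T'.getD j 0 = (e : Int) := by
        intro j hj
        rcases e2 j hj with h | h
        · rw [h]; exact i5 j hj
        · right; exact ⟨d+1, by rw [h.2]; push_cast; ring⟩
      have n6 : ∀ j, j < n → pvLR cm n H j (d+1) → ∃ w ∈ W, pvJdx n w = j := by
        intro j hj hlr
        have hTj : T.getD j 0 = -1 := by
          by_contra hc
          exact hlr.2 d (by omega) ((i3 j hj).mp hc)
        rcases hlr.1 with hr | ⟨j', hj', hrj', v, hv, hjv⟩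
        · exact absurd hr (hlr.2 d (by omega))
        · have hTj' : T.getD j' 0 ≠ -1 := (i3 j' hj').mpr hrj'
          rcases i5 j' hj' with h | ⟨e', he'⟩
          · exact absurd h hTj'
          · obtain ⟨hlr', hed, _⟩ := i4 j' hj' e' he'
            have he'd : e' = d := by
              by_contra hne
              have : pvReach cm n H (e'+1) j := Or.inr ⟨j', hj', hlr'.1, v, hv, hjv⟩
              exact hlr.2 d (by omega)
                (pvReach_mono cm n H (e'+1) d j (by omega) this)
            obtain ⟨u, hu, hju⟩ := i6 j' hj' (he'd ▸ hlr')
            exact (e4 j hj).mpr ⟨hTj, u, hu, v, by rw [hju]; exact hv, hjv⟩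
      have hInv' : pvInv cm n H (d+1) T' W :=
        ⟨e1, n2, n3, n4, n5, n6, fun _ => n7⟩
      rw [hA]
      exact ih T' W (d+1) (fuel - F.length) (by omega) hInv' hW (by
        have := List.length_pos_iff.mpr hF
        omega)

-- A's hospital-initialisation fold
lemma pvInitA (n : Nat) :
    ∀ (H T Q : List Int), T.length = n → (∀ h ∈ H, pvInR n h) →
      (let r := H.foldl (fun (st : List Int × List Int) h =>
          (PySem.List.pySetD st.1 h 0, st.2 ++ [h])) (T, Q);
       r.1.length = n ∧ r.2 = Q ++ H ∧
       (∀ j, j < n → (r.1.getD j 0 = 0 ∧ (T.getD j 0 = 0 ∨ ∃ h ∈ H, pvJdx n h = j)) ∨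
          (r.1.getD j 0 = T.getD j 0 ∧ ¬ ∃ h ∈ H, pvJdx n h = j))) := by
  intro H
  induction H with
  | nil =>
    intro T Q hT _
    refine ⟨hT, by simp, ?_⟩
    intro j hj
    right
    exact ⟨rfl, by simp⟩
  | cons h0 Hs ih =>
    intro T Q hT hr
    have hInR := hr h0 (by simp)
    have hj0 : pvJdx n h0 < n := pvJdx_lt n h0 hInR.1 hInR.2
    have e1 : PySem.List.pySetD T h0 0 = T.set (pvJdx n h0) 0 := by
      rw [pvSet_wrap T h0 0 (by rw [hT]; exact hInR.1) (by rw [hT]; exact hInR.2), hT]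
    simp only [List.foldl_cons, e1]
    obtain ⟨c1, c2, c3⟩ := ih (T.set (pvJdx n h0) 0) (Q ++ [h0]) (by simpa using hT)
      (fun h hm => hr h (by simp [hm]))
    refine ⟨c1, by rw [c2]; simp, ?_⟩
    intro j hj
    rcases c3 j hj with ⟨hv, hcase⟩ | ⟨hv, hnone⟩
    · left
      refine ⟨hv, ?_⟩
      rcases hcase with h | ⟨h', hm', hj'⟩
      · by_cases hje : pvJdx n h0 = j
        · exact Or.inr ⟨h0, by simp, hje⟩
        · rw [pvGetD_set_ne _ _ _ _ _ hje] at h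
          exact Or.inl h
      · exact Or.inr ⟨h', by simp [hm'], hj'⟩
    · by_cases hje : pvJdx n h0 = j
      · left
        subst hje
        refine ⟨?_, Or.inr ⟨h0, by simp, rfl⟩⟩
        rw [hv]
        exact pvGetD_set_self T _ 0 0 (by omega)
      · right
        rw [hv, pvGetD_set_ne _ _ _ _ _ hje]
        refine ⟨rfl, ?_⟩
        rintro ⟨h', hm', hj'⟩
        rcases List.mem_cons.mp hm' with rfl | hm''
        · exact hje hj'
        · exact hnone ⟨h', hm'', hj'⟩

-- ===== B-side lemmas =====

def pvSumNat (D : List Int) : Nat := (D.map Int.toNat).sum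

lemma pvSumNat_set : ∀ (D : List Int) (j : Nat) (v : Int), j < D.length →
    pvSumNat (D.set j v) + (D.getD j 0).toNat = pvSumNat D + v.toNat := by
  intro D
  induction D with
  | nil => intro j v h; simp at h
  | cons x xs ih =>
    intro j v h
    cases j with
    | zero => simp [pvSumNat]; omega
    | succ j =>
      have := ih j v (by simpa using h)
      simp only [List.set_cons_succ, pvSumNat, List.map_cons, List.sum_cons] at *
      have hg : (x :: xs).getD (j+1) 0 = xs.getD j 0 := by simp
      rw [hg]
      omega

lemma pvAddEdge_length (m : List (List Int)) (a b : Int) :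
    (pvAddEdge m a b).length = m.length := by
  unfold pvAddEdge
  rw [pvSetD_length, pvSetD_length]

lemma pvFoldEdges_length : ∀ (ps : List (Int × Int)) (m : List (List Int)),
    (ps.foldl (fun m p => pvAddEdge m p.1 p.2) m).length = m.length := by
  intro ps
  induction ps with
  | nil => intro m; rfl
  | cons p ps ih => intro m; rw [List.foldl_cons, ih, pvAddEdge_length]

lemma pvNbh_addEdge (n : Nat) (m : List (List Int)) (a b : Int)
    (hm : m.length = n) (ha : pvInR n a) (hb : pvInR n b) (j : Nat) (hj : j < n) (v : Int) :
    v ∈ pvNbh (pvAddEdge m a b) j ↔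
      v ∈ pvNbh m j ∨ (pvJdx n a = j ∧ v = b) ∨ (pvJdx n b = j ∧ v = a) := by
  have hja : pvJdx n a < n := pvJdx_lt n a ha.1 ha.2
  have hjb : pvJdx n b < n := pvJdx_lt n b hb.1 hb.2
  have ega : PySem.List.pyGetD m a [] = pvNbh m (pvJdx n a) := by
    rw [pvGet_wrap m a [] (by rw [hm]; exact ha.1) (by rw [hm]; exact ha.2), hm]; rfl
  have esa : PySem.List.pySetD m a (PySem.List.pyGetD m a [] ++ [b])
      = m.set (pvJdx n a) (pvNbh m (pvJdx n a) ++ [b]) := by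
    rw [pvSet_wrap m a _ (by rw [hm]; exact ha.1) (by rw [hm]; exact ha.2), hm, ega]
  unfold pvAddEdge
  rw [esa]
  set m1 := m.set (pvJdx n a) (pvNbh m (pvJdx n a) ++ [b]) with hm1
  have hm1l : m1.length = n := by rw [hm1]; simpa using hm
  have egb : PySem.List.pyGetD m1 b [] = pvNbh m1 (pvJdx n b) := by
    rw [pvGet_wrap m1 b [] (by rw [hm1l]; exact hb.1) (by rw [hm1l]; exact hb.2), hm1l]; rfl
  have esb : PySem.List.pySetD m1 b (PySem.List.pyGetD m1 b [] ++ [a])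
      = m1.set (pvJdx n b) (pvNbh m1 (pvJdx n b) ++ [a]) := by
    rw [pvSet_wrap m1 b _ (by rw [hm1l]; exact hb.1) (by rw [hm1l]; exact hb.2), hm1l, egb]
  rw [esb]
  have hnb1 : ∀ k, k < n → pvNbh m1 k
      = if pvJdx n a = k then pvNbh m (pvJdx n a) ++ [b] else pvNbh m k := by
    intro k hk
    by_cases hak : pvJdx n a = k
    · subst hak
      simp only [if_pos rfl]
      exact pvGetD_set_self m _ _ [] (by omega)
    · simp only [if_neg hak]
      exact pvGetD_set_ne m _ _ _ [] hak
  have hnb2 : ∀ k, k < n → pvNbh (m1.set (pvJdx n b) (pvNbh m1 (pvJdx n b) ++ [a])) k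
      = if pvJdx n b = k then pvNbh m1 (pvJdx n b) ++ [a] else pvNbh m1 k := by
    intro k hk
    by_cases hbk : pvJdx n b = k
    · subst hbk
      simp only [if_pos rfl]
      exact pvGetD_set_self m1 _ _ [] (by omega)
    · simp only [if_neg hbk]
      exact pvGetD_set_ne m1 _ _ _ [] hbk
  rw [show pvNbh (m1.set (pvJdx n b) (pvNbh m1 (pvJdx n b) ++ [a])) j
      = if pvJdx n b = j then pvNbh m1 (pvJdx n b) ++ [a] else pvNbh m1 j from hnb2 j hj]
  by_cases hbj : pvJdx n b = j
  · rw [if_pos hbj, hnb1 (pvJdx n b) hjb]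
    by_cases hab : pvJdx n a = pvJdx n b
    · rw [if_pos hab]
      simp only [List.mem_append, List.mem_singleton, hab, hbj]
      tauto
    · rw [if_neg hab]
      have haj : ¬ (pvJdx n a = j) := by rw [← hbj]; exact hab
      simp only [List.mem_append, List.mem_singleton, hbj, haj, false_and]
      tauto
  · rw [if_neg hbj, hnb1 j hj]
    by_cases haj : pvJdx n a = j
    · rw [if_pos haj]
      simp only [List.mem_append, List.mem_singleton, haj, hbj, false_and]
      tauto
    · rw [if_neg haj]
      simp [haj, hbj]

lemma pvNbh_fold (n : Nat) : ∀ (ps : List (Int × Int)) (m : List (List Int)),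
    m.length = n → (∀ p ∈ ps, pvInR n p.1 ∧ pvInR n p.2) → ∀ j, j < n → ∀ v : Int,
    (v ∈ pvNbh (ps.foldl (fun m p => pvAddEdge m p.1 p.2) m) j ↔
     v ∈ pvNbh m j ∨ ∃ p ∈ ps, (pvJdx n p.1 = j ∧ v = p.2) ∨ (pvJdx n p.2 = j ∧ v = p.1)) := by
  intro ps
  induction ps with
  | nil => intro m hm _ j hj v; simp
  | cons p ps ih =>
    intro m hm hps j hj v
    rw [List.foldl_cons]
    rw [ih (pvAddEdge m p.1 p.2) (by rw [pvAddEdge_length]; exact hm)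
      (fun q hq => hps q (by simp [hq])) j hj v]
    rw [pvNbh_addEdge n m p.1 p.2 hm (hps p (by simp)).1 (hps p (by simp)).2 j hj v]
    constructor
    · rintro ((h | h) | ⟨q, hq, h⟩)
      · exact Or.inl h
      · exact Or.inr ⟨p, by simp, h⟩
      · exact Or.inr ⟨q, by simp [hq], h⟩
    · rintro (h | ⟨q, hq, h⟩)
      · exact Or.inl (Or.inl h)
      · rcases List.mem_cons.mp hq with rfl | hq'
        · exact Or.inl (Or.inr h)
        · exact Or.inr ⟨q, hq', h⟩

-- B's loop invariant over the distance array
def pvBInv (cm : List (List Int)) (n : Nat) (H : List Int) (N : Int) (D : List Int) : Prop :=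
  D.length = n ∧
  (∀ j, j < n → 0 ≤ D.getD j 0 ∧ D.getD j 0 ≤ N) ∧
  (∀ j, j < n → D.getD j 0 < N → pvReach cm n H (D.getD j 0).toNat j) ∧
  (∀ h ∈ H, pvInR n h → D.getD (pvJdx n h) 0 = 0)

def pvEdgeOK (cm : List (List Int)) (n : Nat) (p : Int × Int) : Prop :=
  pvInR n p.1 ∧ pvInR n p.2 ∧ p.2 ∈ pvNbh cm (pvJdx n p.1) ∧ p.1 ∈ pvNbh cm (pvJdx n p.2)

lemma pvBInv_set (cm : List (List Int)) (n : Nat) (H : List Int) (N : Int) (D : List Int)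
    (hD : pvBInv cm n H N D) (j0 : Nat) (hj0 : j0 < n) (w : Int)
    (hw0 : 0 ≤ w) (hwlt : w < D.getD j0 0)
    (hws : w < N → pvReach cm n H w.toNat j0) :
    pvBInv cm n H N (D.set j0 w) ∧ pvSumNat (D.set j0 w) < pvSumNat D := by
  obtain ⟨h1, h2, h3, h4⟩ := hD
  have hjl : j0 < D.length := by omega
  constructor
  · refine ⟨by simpa using h1, ?_, ?_, ?_⟩
    · intro j hj
      by_cases hjj : j0 = j
      · subst hjj
        rw [pvGetD_set_self _ _ _ _ hjl]
        exact ⟨hw0, le_trans (le_of_lt hwlt) (h2 j0 hj0).2⟩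
      · rw [pvGetD_set_ne _ _ _ _ _ hjj]
        exact h2 j hj
    · intro j hj
      by_cases hjj : j0 = j
      · subst hjj
        rw [pvGetD_set_self _ _ _ _ hjl]
        exact hws
      · rw [pvGetD_set_ne _ _ _ _ _ hjj]
        exact h3 j hj
    · intro h hm hInR
      by_cases hjj : j0 = pvJdx n h
      · exfalso
        have := h4 h hm hInR
        rw [← hjj] at this
        omega
      · rw [pvGetD_set_ne _ _ _ _ _ (by omega : j0 ≠ pvJdx n h)]
        exact h4 h hm hInR
  · have := pvSumNat_set D j0 w hjl
    have hold : 0 ≤ D.getD j0 0 := (h2 j0 hj0).1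
    omega

lemma pvRelaxA (cm : List (List Int)) (n : Nat) (H : List Int) (N : Int)
    (p : Int × Int) (D : List Int) (c : Bool)
    (hp : pvEdgeOK cm n p) (hD : pvBInv cm n H N D) :
    pvBInv cm n H N (pvRelax (D, c) p).1 ∧
    pvSumNat (pvRelax (D, c) p).1 ≤ pvSumNat D ∧
    ((pvRelax (D, c) p).2 = true → c = true ∨ pvSumNat (pvRelax (D, c) p).1 < pvSumNat D) ∧
    ((pvRelax (D, c) p).2 = false → (pvRelax (D, c) p).1 = D ∧ (pvRelax (D, c) p).2 = c ∧
      ¬(D.getD (pvJdx n p.1) 0 + 1 < D.getD (pvJdx n p.2) 0) ∧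
      ¬(D.getD (pvJdx n p.2) 0 + 1 < D.getD (pvJdx n p.1) 0)) := by
  obtain ⟨ha, hb, hmemb, hmema⟩ := hp
  have hja : pvJdx n p.1 < n := pvJdx_lt n p.1 ha.1 ha.2
  have hjb : pvJdx n p.2 < n := pvJdx_lt n p.2 hb.1 hb.2
  have hlen : D.length = n := hD.1
  have ega : PySem.List.pyGetD D p.1 0 = D.getD (pvJdx n p.1) 0 := by
    rw [pvGet_wrap D p.1 0 (by rw [hlen]; exact ha.1) (by rw [hlen]; exact ha.2), hlen]
  have egb : PySem.List.pyGetD D p.2 0 = D.getD (pvJdx n p.2) 0 := by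
    rw [pvGet_wrap D p.2 0 (by rw [hlen]; exact hb.1) (by rw [hlen]; exact hb.2), hlen]
  set da := D.getD (pvJdx n p.1) 0 with hda
  set db := D.getD (pvJdx n p.2) 0 with hdb
  have hbnd_a := hD.2.1 (pvJdx n p.1) hja
  have hbnd_b := hD.2.1 (pvJdx n p.2) hjb
  unfold pvRelax
  by_cases h1 : da + 1 < db
  · -- first relaxation fires; the second condition then cannot
    set D1 := D.set (pvJdx n p.2) (da + 1) with hD1
    have hset1 : PySem.List.pySetD D p.2 (da + 1) = D1 := by
      rw [pvSet_wrap D p.2 _ (by rw [hlen]; exact hb.1) (by rw [hlen]; exact hb.2), hlen, hD1]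
    have hD1len : D1.length = n := by rw [hD1]; simpa using hlen
    have hD1b : D1.getD (pvJdx n p.2) 0 = da + 1 := by
      rw [hD1]; exact pvGetD_set_self _ _ _ _ (by omega)
    have hD1a : D1.getD (pvJdx n p.1) 0
        = (if pvJdx n p.2 = pvJdx n p.1 then da + 1 else da) := by
      by_cases hab : pvJdx n p.2 = pvJdx n p.1
      · rw [if_pos hab, hD1, ← hab]
        exact pvGetD_set_self _ _ _ _ (by omega)
      · rw [if_neg hab, hD1]
        exact pvGetD_set_ne _ _ _ _ _ hab
    have eg1b : PySem.List.pyGetD D1 p.2 0 = da + 1 := by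
      rw [pvGet_wrap D1 p.2 0 (by rw [hD1len]; exact hb.1) (by rw [hD1len]; exact hb.2),
        hD1len, hD1b]
    have eg1a : PySem.List.pyGetD D1 p.1 0
        = (if pvJdx n p.2 = pvJdx n p.1 then da + 1 else da) := by
      rw [pvGet_wrap D1 p.1 0 (by rw [hD1len]; exact ha.1) (by rw [hD1len]; exact ha.2),
        hD1len, hD1a]
    have hsound : da + 1 < N → pvReach cm n H (da + 1).toNat (pvJdx n p.2) := by
      intro hlt
      have hdalt : da < N := by omega
      have hra : pvReach cm n H da.toNat (pvJdx n p.1) := hD.2.2.1 (pvJdx n p.1) hja hdalt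
      have hstep : pvReach cm n H (da.toNat + 1) (pvJdx n p.2) :=
        Or.inr ⟨pvJdx n p.1, hja, hra, p.2, hmemb, rfl⟩
      have he : (da + 1).toNat = da.toNat + 1 := by omega
      rw [he]
      exact hstep
    obtain ⟨hBInv1, hsum1⟩ :=
      pvBInv_set cm n H N D hD (pvJdx n p.2) hjb (da + 1) (by omega) (by omega) hsound
    rw [← hD1] at hBInv1 hsum1
    have h2false : ¬ (PySem.List.pyGetD D1 p.2 0 + 1 < PySem.List.pyGetD D1 p.1 0) := by
      rw [eg1b, eg1a]
      split <;> omega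
    simp only [ega, egb, ← hda, ← hdb, if_pos h1, hset1, if_neg h2false]
    exact ⟨hBInv1, le_of_lt hsum1, fun _ => Or.inr hsum1, fun hcon => by simp at hcon⟩
  · -- first relaxation does not fire
    by_cases h2 : db + 1 < da
    · set D2 := D.set (pvJdx n p.1) (db + 1) with hD2
      have hset2 : PySem.List.pySetD D p.1 (db + 1) = D2 := by
        rw [pvSet_wrap D p.1 _ (by rw [hlen]; exact ha.1) (by rw [hlen]; exact ha.2), hlen, hD2]
      have hsound : db + 1 < N → pvReach cm n H (db + 1).toNat (pvJdx n p.1) := by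
        intro hlt
        have hdblt : db < N := by omega
        have hrb : pvReach cm n H db.toNat (pvJdx n p.2) := hD.2.2.1 (pvJdx n p.2) hjb hdblt
        have hstep : pvReach cm n H (db.toNat + 1) (pvJdx n p.1) :=
          Or.inr ⟨pvJdx n p.2, hjb, hrb, p.1, hmema, rfl⟩
        have he : (db + 1).toNat = db.toNat + 1 := by omega
        rw [he]
        exact hstep
      obtain ⟨hBInv2, hsum2⟩ :=
        pvBInv_set cm n H N D hD (pvJdx n p.1) hja (db + 1) (by omega) (by omega) hsound
      rw [← hD2] at hBInv2 hsum2
      simp only [ega, egb, ← hda, ← hdb, if_neg h1, if_pos h2, hset2]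
      exact ⟨hBInv2, le_of_lt hsum2, fun _ => Or.inr hsum2, fun hcon => by simp at hcon⟩
    · simp only [ega, egb, ← hda, ← hdb, if_neg h1, if_neg h2]
      exact ⟨hD, le_refl _, fun hc => Or.inl hc, fun _ => ⟨by trivial, by trivial, h1, h2⟩⟩

-- one full relaxation pass over the edge list
lemma pvPassA (cm : List (List Int)) (n : Nat) (H : List Int) (N : Int) :
    ∀ (es : List (Int × Int)) (D : List Int) (c : Bool),
      (∀ p ∈ es, pvEdgeOK cm n p) → pvBInv cm n H N D →
      (pvBInv cm n H N (es.foldl pvRelax (D, c)).1 ∧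
       pvSumNat (es.foldl pvRelax (D, c)).1 ≤ pvSumNat D ∧
       ((es.foldl pvRelax (D, c)).2 = true → c = true ∨
          pvSumNat (es.foldl pvRelax (D, c)).1 < pvSumNat D) ∧
       ((es.foldl pvRelax (D, c)).2 = false → (es.foldl pvRelax (D, c)).1 = D ∧ c = false ∧
          ∀ p ∈ es, ¬(D.getD (pvJdx n p.1) 0 + 1 < D.getD (pvJdx n p.2) 0) ∧
            ¬(D.getD (pvJdx n p.2) 0 + 1 < D.getD (pvJdx n p.1) 0))) := by
  intro es
  induction es with
  | nil =>
    intro D c _ hD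
    exact ⟨hD, le_refl _, fun hc => Or.inl hc, fun hc => ⟨rfl, hc, by simp⟩⟩
  | cons p es ih =>
    intro D c hes hD
    obtain ⟨r1, r2, r3, r4⟩ := pvRelaxA cm n H N p D c (hes p (by simp)) hD
    simp only [List.foldl_cons]
    have hpair : pvRelax (D, c) p = ((pvRelax (D, c) p).1, (pvRelax (D, c) p).2) := rfl
    rw [hpair]
    obtain ⟨f1, f2, f3, f4⟩ :=
      ih (pvRelax (D, c) p).1 (pvRelax (D, c) p).2 (fun q hq => hes q (by simp [hq])) r1
    refine ⟨f1, le_trans f2 r2, ?_, ?_⟩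
    · intro hr
      rcases f3 hr with h | h
      · rcases r3 h with h' | h'
        · exact Or.inl h'
        · exact Or.inr (by omega)
      · exact Or.inr (by omega)
    · intro hr
      obtain ⟨g1, g2, g3⟩ := f4 hr
      obtain ⟨k1, k2, k3, k4⟩ := r4 g2
      refine ⟨by rw [g1, k1], by rw [← k2, g2], ?_⟩
      intro q hq
      rcases List.mem_cons.mp hq with rfl | hq'
      · exact ⟨k3, k4⟩
      · have := g3 q hq'
        rw [k1] at this
        exact this

-- the while-changed loop reaches a stable array within the fuel
lemma pvBFA (cm : List (List Int)) (n : Nat) (H : List Int) (N : Int)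
    (es : List (Int × Int)) (hes : ∀ p ∈ es, pvEdgeOK cm n p) :
    ∀ (fuel : Nat) (D : List Int), pvBInv cm n H N D → pvSumNat D < fuel →
      (pvBInv cm n H N (pvBF es fuel D) ∧
       ∀ p ∈ es,
         ¬((pvBF es fuel D).getD (pvJdx n p.1) 0 + 1 < (pvBF es fuel D).getD (pvJdx n p.2) 0) ∧
         ¬((pvBF es fuel D).getD (pvJdx n p.2) 0 + 1 < (pvBF es fuel D).getD (pvJdx n p.1) 0)) := by
  intro fuel
  induction fuel with
  | zero => intro D _ h; omega
  | succ fuel ih =>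
    intro D hD hfuel
    obtain ⟨r1, r2, r3, r4⟩ := pvPassA cm n H N es D false hes hD
    have hunf : pvBF es (fuel+1) D
        = (if (es.foldl pvRelax (D, false)).2 = true
            then pvBF es fuel (es.foldl pvRelax (D, false)).1
            else (es.foldl pvRelax (D, false)).1) := rfl
    by_cases hr : (es.foldl pvRelax (D, false)).2 = true
    · have hstrict : pvSumNat (es.foldl pvRelax (D, false)).1 < pvSumNat D := by
        rcases r3 hr with h | h
        · simp at h
        · exact h
      rw [hunf, if_pos hr]
      exact ih (es.foldl pvRelax (D, false)).1 r1 (by omega)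
    · obtain ⟨g1, _, g3⟩ := r4 (by simpa using hr)
      rw [hunf, if_neg hr, g1]
      exact ⟨hD, g3⟩

-- a stable array dominated by every reachability level
lemma pvComplete (cm : List (List Int)) (n : Nat) (H : List Int)
    (es : List (Int × Int)) (D : List Int)
    (hconv : ∀ j, j < n → ∀ v ∈ pvNbh cm j, ∃ p ∈ es,
        (pvJdx n p.1 = j ∧ p.2 = v) ∨ (pvJdx n p.2 = j ∧ p.1 = v))
    (hstab : ∀ p ∈ es,
        ¬(D.getD (pvJdx n p.1) 0 + 1 < D.getD (pvJdx n p.2) 0) ∧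
        ¬(D.getD (pvJdx n p.2) 0 + 1 < D.getD (pvJdx n p.1) 0))
    (hhosp : ∀ h ∈ H, pvInR n h → D.getD (pvJdx n h) 0 = 0)
    (hH : ∀ h ∈ H, pvInR n h) :
    ∀ (k j : Nat), pvReach cm n H k j → D.getD j 0 ≤ (k : Int) := by
  intro k
  induction k with
  | zero =>
    intro j hr
    obtain ⟨h0, hm, hj⟩ := hr
    rw [← hj]
    rw [hhosp h0 hm (hH h0 hm)]
    simp
  | succ k ih =>
    intro j hr
    rcases hr with hr | ⟨j', hj', hrj', v, hv, hjv⟩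
    · have := ih j hr
      push_cast
      omega
    · have hdj' := ih j' hrj'
      obtain ⟨q, hq, hcase⟩ := hconv j' hj' v hv
      obtain ⟨c1, c2⟩ := hstab q hq
      rcases hcase with ⟨hq1, hq2⟩ | ⟨hq1, hq2⟩
      · rw [hq1] at c1
        rw [← hjv, ← hq2]
        push_cast
        omega
      · rw [hq1] at c2
        rw [← hjv, ← hq2]
        push_cast
        omega

-- B's hospital-initialisation fold
lemma pvInitB (n : Nat) (N : Int) :
    ∀ (H D : List Int), D.length = n → (∀ h ∈ H, pvInR n h) →
      (let r := H.foldl (fun d h => PySem.List.pySetD d h 0) D;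
       r.length = n ∧
       (∀ j, j < n → (r.getD j 0 = 0 ∧ (D.getD j 0 = 0 ∨ ∃ h ∈ H, pvJdx n h = j)) ∨
          (r.getD j 0 = D.getD j 0 ∧ ¬ ∃ h ∈ H, pvJdx n h = j))) := by
  intro H
  induction H with
  | nil =>
    intro D hD _
    exact ⟨hD, fun j hj => Or.inr ⟨rfl, by simp⟩⟩
  | cons h0 Hs ih =>
    intro D hD hr
    have hInR := hr h0 (by simp)
    have hj0 : pvJdx n h0 < n := pvJdx_lt n h0 hInR.1 hInR.2
    have e1 : PySem.List.pySetD D h0 0 = D.set (pvJdx n h0) 0 := by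
      rw [pvSet_wrap D h0 0 (by rw [hD]; exact hInR.1) (by rw [hD]; exact hInR.2), hD]
    simp only [List.foldl_cons, e1]
    obtain ⟨c1, c3⟩ := ih (D.set (pvJdx n h0) 0) (by simpa using hD)
      (fun h hm => hr h (by simp [hm]))
    refine ⟨c1, ?_⟩
    intro j hj
    rcases c3 j hj with ⟨hv, hcase⟩ | ⟨hv, hnone⟩
    · left
      refine ⟨hv, ?_⟩
      rcases hcase with h | ⟨h', hm', hj'⟩
      · by_cases hje : pvJdx n h0 = j
        · exact Or.inr ⟨h0, by simp, hje⟩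
        · rw [pvGetD_set_ne _ _ _ _ _ hje] at h
          exact Or.inl h
      · exact Or.inr ⟨h', by simp [hm'], hj'⟩
    · by_cases hje : pvJdx n h0 = j
      · left
        subst hje
        refine ⟨?_, Or.inr ⟨h0, by simp, rfl⟩⟩
        rw [hv]
        exact pvGetD_set_self D _ 0 0 (by omega)
      · right
        rw [hv, pvGetD_set_ne _ _ _ _ _ hje]
        refine ⟨rfl, ?_⟩
        rintro ⟨h', hm', hj'⟩
        rcases List.mem_cons.mp hm' with rfl | hm''
        · exact hje hj'
        · exact hnone ⟨h', hm'', hj'⟩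

-- the empty initial adjacency structure
lemma pvCm0_len (N : Int) :
    ((PySem.List.pyRange 0 N 1).map (fun _ => ([] : List Int))).length = N.toNat := by
  simp [PySem.List.length_pyRange_one]

lemma pvCm0_nbh (N : Int) (j : Nat) :
    pvNbh ((PySem.List.pyRange 0 N 1).map (fun _ => ([] : List Int))) j = [] := by
  unfold pvNbh
  rcases Nat.lt_or_ge j ((PySem.List.pyRange 0 N 1).map (fun _ => ([] : List Int))).length
    with h | h
  · rw [pvGetD_eq_getElem _ _ _ h]
    simp
  · rw [List.getD_eq_getElem?_getD, List.getElem?_eq_none (by omega)]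
    rfl

-- combining lemma: A's characterised array against B's stable relaxation array
lemma pvFinal (cm : List (List Int)) (n : Nat) (H : List Int) (N : Int)
    (es : List (Int × Int)) (T R : List Int)
    (hn : n = N.toNat)
    (hchar : pvChar cm n H T)
    (hBInv : pvBInv cm n H N R)
    (hstab : ∀ p ∈ es,
        ¬(R.getD (pvJdx n p.1) 0 + 1 < R.getD (pvJdx n p.2) 0) ∧
        ¬(R.getD (pvJdx n p.2) 0 + 1 < R.getD (pvJdx n p.1) 0))
    (hconv : ∀ j, j < n → ∀ v ∈ pvNbh cm j, ∃ p ∈ es,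
        (pvJdx n p.1 = j ∧ p.2 = v) ∨ (pvJdx n p.2 = j ∧ p.1 = v))
    (hH : ∀ h ∈ H, pvInR n h) :
    pvMaxLoop T 0 = (if R.contains N then (-1 : Int)
      else (PySem.List.max? R (fun x => x)).getD 0) := by
  obtain ⟨hTlen, hjchar⟩ := hchar
  obtain ⟨hRlen, hbnd, hsound, hhosp⟩ := hBInv
  have hcomp := pvComplete cm n H es R hconv hstab hhosp hH
  have hTR : ∀ j, j < n → (T.getD j 0 = -1 ∧ R.getD j 0 = N) ∨
      (T.getD j 0 = R.getD j 0 ∧ 0 ≤ T.getD j 0 ∧ T.getD j 0 < N) := by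
    intro j hj
    rcases hjchar j hj with ⟨hTj, hunreach⟩ | ⟨e, hTj, hlr, hen⟩
    · left
      refine ⟨hTj, ?_⟩
      have h1 := (hbnd j hj).2
      by_cases h2 : R.getD j 0 < N
      · exact absurd (hsound j hj h2) (hunreach _)
      · omega
    · right
      have hnN : ((n : Nat) : Int) = N := by omega
      have heN : (e : Int) < N := by omega
      have hle : R.getD j 0 ≤ (e : Int) := hcomp e j hlr.1
      have hge : (e : Int) ≤ R.getD j 0 := by
        have h0 := (hbnd j hj).1
        have hRs : pvReach cm n H (R.getD j 0).toNat j := hsound j hj (by omega)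
        by_contra hc
        have hlt : (R.getD j 0).toNat < e := by omega
        exact hlr.2 _ hlt hRs
      rw [hTj]
      omega
  by_cases hneg : ∃ j, j < n ∧ T.getD j 0 = -1
  · obtain ⟨j, hj, hTj⟩ := hneg
    have hmemT : (-1 : Int) ∈ T := by
      have : j < T.length := by omega
      rw [pvGetD_eq_getElem _ _ _ this] at hTj
      exact hTj ▸ List.getElem_mem this
    rw [pvMaxLoop_neg T 0 hmemT]
    have hRN : R.getD j 0 = N := by
      rcases hTR j hj with h | h
      · exact h.2
      · rw [hTj] at h; omega
    have hmemR : N ∈ R := by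
      have hjR : j < R.length := by omega
      rw [pvGetD_eq_getElem _ _ _ hjR] at hRN
      exact hRN ▸ List.getElem_mem hjR
    rw [if_pos (by simpa using hmemR)]
  · have hall : ∀ j, j < n → T.getD j 0 = R.getD j 0 ∧ 0 ≤ T.getD j 0 ∧ T.getD j 0 < N := by
      intro j hj
      rcases hTR j hj with h | h
      · exact absurd ⟨j, hj, h.1⟩ hneg
      · exact h
    have hTReq : T = R := by
      apply List.ext_getElem (by omega)
      intro j h1 h2
      have hj : j < n := by omega
      have := (hall j hj).1
      rw [pvGetD_eq_getElem _ _ _ h1, pvGetD_eq_getElem _ _ _ h2] at this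
      exact this
    have hnomem : N ∉ R := by
      intro hmem
      obtain ⟨j, hjR, hRj⟩ := List.mem_iff_getElem.mp hmem
      have hj : j < n := by omega
      have := (hall j hj).2.2
      rw [(hall j hj).1, pvGetD_eq_getElem _ _ _ hjR, hRj] at this
      omega
    rw [if_neg (by simpa using hnomem)]
    have hnonegT : (-1 : Int) ∉ T := by
      intro hmem
      obtain ⟨j, hjT, hTj⟩ := List.mem_iff_getElem.mp hmem
      have hj : j < n := by omega
      have := (hall j hj).2.1
      rw [pvGetD_eq_getElem _ _ _ hjT, hTj] at this
      omega
    rw [pvMaxLoop_no_neg T 0 hnonegT, hTReq]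
    cases hR : R with
    | nil => simp [PySem.List.max?]
    | cons x xs =>
      have hx0 : 0 ≤ x := by
        have h0 : (0 : Nat) < n := by rw [hR] at hRlen; simp at hRlen; omega
        have := (hall 0 h0).2.1
        rw [(hall 0 h0).1, hR] at this
        simpa using this
      rw [PySem.List.max?_id_cons]
      simp only [Option.getD_some]
      have hf : (fun (a t : Int) => if a < t then t else a) = (fun (a t : Int) => max a t) := by
        funext a t
        rw [max_def]
        split_ifs <;> omega
      rw [hf]
      simp only [List.foldl_cons]
      rw [max_eq_right hx0]

-- ===== VERDICT (by name: the statement is the Claim_ definition above) =====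
theorem solution_spec : Claim_equal_solution := by
  unfold Claim_equal_solution
  intro N A B H _ hPre
  obtain ⟨hlen, hA, hB, hH⟩ := hPre
  unfold Spec_solution
  simp only [solution, solution_alt]
  rw [pvBuildEq A B hlen]
  set n := N.toNat with hn
  set cm0 := (PySem.List.pyRange 0 N 1).map (fun _ => ([] : List Int)) with hcm0
  set es := A.zip B with hes0
  set cm := es.foldl (fun m p => pvAddEdge m p.1 p.2) cm0 with hcm
  have hzip : A.zip B = A.zip (B.take A.length) := by
    conv_lhs => rw [List.zip_eq_zip_take_min]
    conv_rhs => rw [List.zip_eq_zip_take_min]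
    simp [List.take_take]
  have hesInR : ∀ p ∈ es, pvInR n p.1 ∧ pvInR n p.2 := by
    intro p hp
    rw [hes0, hzip] at hp
    obtain ⟨h1, h2⟩ := List.of_mem_zip hp
    have hp1 := hA p.1 h1
    have hp2 := hB p.2 h2
    exact ⟨⟨by omega, by omega⟩, ⟨by omega, by omega⟩⟩
  have hHInR : ∀ h ∈ H, pvInR n h := by
    intro h hm
    have := hH h hm
    exact ⟨by omega, by omega⟩
  have hcm0len : cm0.length = n := by rw [hcm0]; rw [pvCm0_len]
  have hcmlen : cm.length = n := by rw [hcm, pvFoldEdges_length, hcm0len]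
  have hnbhchar : ∀ j, j < n → ∀ v : Int, (v ∈ pvNbh cm j ↔ ∃ p ∈ es,
      (pvJdx n p.1 = j ∧ v = p.2) ∨ (pvJdx n p.2 = j ∧ v = p.1)) := by
    intro j hj v
    rw [hcm, pvNbh_fold n es cm0 hcm0len hesInR j hj v, hcm0, pvCm0_nbh]
    simp
  have hnb : ∀ j, j < n → ∀ v ∈ pvNbh cm j, pvInR n v := by
    intro j hj v hv
    obtain ⟨p, hp, hc⟩ := (hnbhchar j hj v).mp hv
    rcases hc with ⟨_, rfl⟩ | ⟨_, rfl⟩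
    · exact (hesInR p hp).2
    · exact (hesInR p hp).1
  have hconv : ∀ j, j < n → ∀ v ∈ pvNbh cm j, ∃ p ∈ es,
      (pvJdx n p.1 = j ∧ p.2 = v) ∨ (pvJdx n p.2 = j ∧ p.1 = v) := by
    intro j hj v hv
    obtain ⟨p, hp, hc⟩ := (hnbhchar j hj v).mp hv
    rcases hc with ⟨h1, h2⟩ | ⟨h1, h2⟩
    · exact ⟨p, hp, Or.inl ⟨h1, h2.symm⟩⟩
    · exact ⟨p, hp, Or.inr ⟨h1, h2.symm⟩⟩
  have hedgeOK : ∀ p ∈ es, pvEdgeOK cm n p := by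
    intro p hp
    have h1 := (hesInR p hp).1
    have h2 := (hesInR p hp).2
    refine ⟨h1, h2, ?_, ?_⟩
    · exact (hnbhchar (pvJdx n p.1) (pvJdx_lt n p.1 h1.1 h1.2) p.2).mpr
        ⟨p, hp, Or.inl ⟨rfl, rfl⟩⟩
    · exact (hnbhchar (pvJdx n p.2) (pvJdx_lt n p.2 h2.1 h2.2) p.1).mpr
        ⟨p, hp, Or.inr ⟨rfl, rfl⟩⟩
  -- ===== A side: the characterisation of the BFS result =====
  have hrepl : ∀ j, j < n → (List.replicate n (-1 : Int)).getD j 0 = -1 := by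
    intro j hj
    rw [pvGetD_eq_getElem _ _ _ (by simpa using hj)]
    simp
  obtain ⟨a1, a2, a3⟩ := pvInitA n H (List.replicate n (-1)) [] (by simp) hHInR
  set T0 := (H.foldl (fun (st : List Int × List Int) h =>
      (PySem.List.pySetD st.1 h 0, st.2 ++ [h])) (List.replicate n (-1), [])).1 with hT0
  have hF0 : (H.foldl (fun (st : List Int × List Int) h =>
      (PySem.List.pySetD st.1 h 0, st.2 ++ [h])) (List.replicate n (-1), [])).2 = H := by
    rw [a2]; simp
  have ha3 : ∀ j, j < n → (T0.getD j 0 = 0 ∧ ∃ h ∈ H, pvJdx n h = j) ∨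
      (T0.getD j 0 = -1 ∧ ¬ ∃ h ∈ H, pvJdx n h = j) := by
    intro j hj
    rcases a3 j hj with ⟨hv, hc⟩ | ⟨hv, hc⟩
    · rcases hc with hc | hc
      · rw [hrepl j hj] at hc; omega
      · exact Or.inl ⟨hv, hc⟩
    · right
      rw [hrepl j hj] at hv
      exact ⟨hv, hc⟩
  have hcharT : pvChar cm n H (pvBfsA cm (H.length + n) T0
      (H.foldl (fun (st : List Int × List Int) h =>
        (PySem.List.pySetD st.1 h 0, st.2 ++ [h])) (List.replicate n (-1), [])).2) := by
    rw [hF0]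
    cases hHc : H with
    | nil =>
      rw [pvBfsA_nil]
      refine ⟨a1, ?_⟩
      intro j hj
      left
      rcases ha3 j hj with ⟨_, h, hm, _⟩ | ⟨hv, _⟩
      · rw [hHc] at hm; simp at hm
      · refine ⟨hv, ?_⟩
        intro k
        exact pvReach_nilH cm n k j
    | cons h0 H' =>
      rw [← hHc]
      have hHne : H ≠ [] := by rw [hHc]; simp
      have hInRh0 : pvInR n h0 := hHInR h0 (by rw [hHc]; simp)
      have hjh0 : pvJdx n h0 < n := pvJdx_lt n h0 hInRh0.1 hInRh0.2
      have hT0h0 : T0.getD (pvJdx n h0) 0 = 0 := by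
        rcases ha3 _ hjh0 with ⟨hv, _⟩ | ⟨_, hc⟩
        · exact hv
        · exact absurd ⟨h0, by rw [hHc]; simp, rfl⟩ hc
      have hInv0 : pvInv cm n H 0 T0 H := by
        refine ⟨a1, ?_, ?_, ?_, ?_, ?_, ?_⟩
        · intro u hu
          refine ⟨hHInR u hu, ?_⟩
          rcases ha3 _ (pvJdx_lt n u (hHInR u hu).1 (hHInR u hu).2) with ⟨hv, _⟩ | ⟨_, hc⟩
          · rw [hv]; rfl
          · exact absurd ⟨u, hu, rfl⟩ hc
        · intro j hj
          rcases ha3 j hj with ⟨hv, hc⟩ | ⟨hv, hc⟩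
          · constructor
            · intro _; exact hc
            · intro _; rw [hv]; omega
          · constructor
            · intro hcon; exact absurd hv hcon
            · intro hr; exact absurd hr hc
        · intro j hj e he
          rcases ha3 j hj with ⟨hv, hc⟩ | ⟨hv, _⟩
          · have he0 : e = 0 := by rw [hv] at he; omega
            subst he0
            exact ⟨⟨hc, fun e' he' => by omega⟩, le_refl _, by omega⟩
          · rw [hv] at he; omega
        · intro j hj
          rcases ha3 j hj with ⟨hv, _⟩ | ⟨hv, _⟩
          · exact Or.inr ⟨0, by rw [hv]; rfl⟩
          · exact Or.inl hv
        · intro j hj hlr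
          obtain ⟨h', hm', hj'⟩ := hlr.1
          exact ⟨h', hm', hj'⟩
        · intro _
          have := pvCnt_lt_of_marked T0 (pvJdx n h0) (by omega) (by rw [hT0h0]; omega)
          omega
      exact pvRunA cm n H hcmlen hHInR hnb (pvCnt T0) T0 H 0 (H.length + n)
        (le_refl _) hInv0 hHne (by
          have h1 : pvCnt T0 ≤ n := by
            have := pvCnt_le T0
            omega
          omega)
  -- ===== B side: invariant of the initial array, then the stable result =====
  obtain ⟨b1, b3⟩ := pvInitB n N H (List.replicate n N) (by simp) hHInR
  set D0 := H.foldl (fun d h => PySem.List.pySetD d h 0) (List.replicate n N) with hD0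
  have hreplN : ∀ j, j < n → (List.replicate n N).getD j 0 = N := by
    intro j hj
    rw [pvGetD_eq_getElem _ _ _ (by simpa using hj)]
    simp
  have hb3 : ∀ j, j < n → (D0.getD j 0 = 0 ∧ ((N = 0) ∨ ∃ h ∈ H, pvJdx n h = j)) ∨
      (D0.getD j 0 = N ∧ ¬ ∃ h ∈ H, pvJdx n h = j) := by
    intro j hj
    rcases b3 j hj with ⟨hv, hc⟩ | ⟨hv, hc⟩
    · rcases hc with hc | hc
      · rw [hreplN j hj] at hc
        exact Or.inl ⟨hv, Or.inl hc⟩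
      · exact Or.inl ⟨hv, Or.inr hc⟩
    · right
      rw [hreplN j hj] at hv
      exact ⟨hv, hc⟩
  have hN1 : ∀ j, j < n → (1 : Int) ≤ N := by
    intro j hj
    omega
  have hBInv0 : pvBInv cm n H N D0 := by
    refine ⟨b1, ?_, ?_, ?_⟩
    · intro j hj
      rcases hb3 j hj with ⟨hv, _⟩ | ⟨hv, _⟩
      · rw [hv]
        exact ⟨le_refl _, by have := hN1 j hj; omega⟩
      · rw [hv]
        exact ⟨by have := hN1 j hj; omega, le_refl _⟩
    · intro j hj hlt
      rcases hb3 j hj with ⟨hv, hc⟩ | ⟨hv, _⟩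
      · rcases hc with hc | ⟨h', hm', hj'⟩
        · rw [hv, hc] at hlt; omega
        · rw [hv]
          exact ⟨h', hm', hj'⟩
      · rw [hv] at hlt; omega
    · intro h hm hInR
      have hjh : pvJdx n h < n := pvJdx_lt n h hInR.1 hInR.2
      rcases hb3 _ hjh with ⟨hv, _⟩ | ⟨_, hc⟩
      · exact hv
      · exact absurd ⟨h, hm, rfl⟩ hc
  obtain ⟨hBInvR, hstabR⟩ := pvBFA cm n H N es hedgeOK (pvSumNat D0 + 1) D0 hBInv0 (by omega)
  -- ===== combine =====
  exact pvFinal cm n H N es _ _ hn hcharT hBInvR hstabR hconv hHInR
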